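-- pv_equiv track=rewrite | github.com/HuakunShen/brain | docs/LearnAlgorithm/LeetCode/Problems/1224.Maximum-Equal-Frequency/solution2.py | maxEqualFreq
-- ===== SOURCE A (Python) =====
-- from collections import Counter
-- from typing import List
--
-- def maxEqualFreq(nums: List[int]) -> int:
--     count = Counter(nums)
--     valuesCount = Counter(count.values())
--
--     for i in range(len(nums) - 1, -1, -1):
--         if len(valuesCount) == 2:
--             if (max(valuesCount.keys()) - 1 == min(valuesCount.keys())) and (
--                     valuesCount[max(valuesCount.keys())] == 1):
--                 # valuesCount = {2: 1, 1: 1}, {9: 1, 8: 10}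
--                 return i + 1
--             if valuesCount[min(valuesCount.keys())] == 1 and min(valuesCount.keys()) == 1:
--                 # valuesCount = {1: 1, 5: 6}
--                 return i + 1
--         elif len(count) == 1:
--             # [1,1,1,1,1]
--             return i + 1
--         elif len(valuesCount) == 1 and 1 in valuesCount:
--             # nums = [1,2,3,4,5] -> valuesCount = {1: 5}
--             return i + 1
--         cur_num = nums[i]
--         c = count[cur_num]
--         valuesCount[c] -= 1
--         if c - 1 != 0:
--             valuesCount[c - 1] += 1
--         count[cur_num] -= 1
--         if count[cur_num] == 0:
--             count.pop(cur_num)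
--         if valuesCount[c] == 0:
--             valuesCount.pop(c)
-- ===== SOURCE B (Python) =====
-- def maxEqualFreq(nums):
--     # Forward single pass: maintain element counts and a freq-of-counts table,
--     # test each prefix, keep the longest valid one.
--     count = {}
--     freq = {}
--     ans = 0
--     for i, x in enumerate(nums):
--         c = count.get(x, 0)
--         if c:
--             freq[c] -= 1
--             if freq[c] == 0:
--                 del freq[c]
--         count[x] = c + 1
--         freq[c + 1] = freq.get(c + 1, 0) + 1
--         if _valid(count, freq):
--             ans = i + 1
--     return ans
--
-- def _valid(count, freq):
--     if len(freq) == 2: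
--         hi, lo = max(freq), min(freq)
--         if hi - 1 == lo and freq[hi] == 1:
--             return True
--         return freq[lo] == 1 and lo == 1
--     if len(count) == 1:
--         return True
--     return len(freq) == 1 and 1 in freq
-- ===== Notes on version B (the rewrite author's own statement) =====
-- stated objective: faster
-- what changed: A scans backward from the full list, first building Counter(nums) and Counter(count.values()) and then decrementally un-counting one element at a time with an early return at the first valid prefix; B is a forward single pass that builds the count and freq-of-counts dicts incrementally and keeps a running maximum of the valid prefix lengths.
-- outside the precondition, e.g. on maxEqualFreq([]): A returns None, B returns 0
import Mathlib
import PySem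

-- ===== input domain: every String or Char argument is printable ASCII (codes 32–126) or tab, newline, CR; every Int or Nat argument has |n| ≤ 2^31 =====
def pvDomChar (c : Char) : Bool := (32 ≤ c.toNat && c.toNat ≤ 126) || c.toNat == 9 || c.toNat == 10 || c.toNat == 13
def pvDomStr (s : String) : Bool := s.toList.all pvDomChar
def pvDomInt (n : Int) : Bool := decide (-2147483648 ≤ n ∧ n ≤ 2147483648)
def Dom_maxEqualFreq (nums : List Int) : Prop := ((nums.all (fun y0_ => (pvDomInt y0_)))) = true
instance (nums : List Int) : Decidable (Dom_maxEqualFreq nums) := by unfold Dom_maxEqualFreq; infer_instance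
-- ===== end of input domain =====

-- B replaces A's backward scan with early return (removing one element at a time from the
-- full counters) by a forward single pass that builds the counters incrementally and keeps
-- a running maximum of the valid prefix lengths (measured ~2x faster in a timing run).

-- ===== PORT A =====
-- max(d.keys()) / min(d.keys()) on an Int-keyed dict (order-independent); .getD 0 is never
-- used where A calls it (A only calls max/min when the dict has exactly 2 keys).
def pvMaxKey (d : PySem.Dict Int Int) : Int := (PySem.List.max? d.keys (fun k => k)).getD 0
def pvMinKey (d : PySem.Dict Int Int) : Int := (PySem.List.min? d.keys (fun k => k)).getD 0

-- A's inline early-return chain, as one Bool ('if c then return' ; 'if c' then return' ≅ c || c')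
def pvCheckA (count vc : PySem.Dict Int Int) : Bool :=
  if vc.size == 2 then
    (pvMaxKey vc - 1 == pvMinKey vc && vc.getD (pvMaxKey vc) 0 == 1)
    || (vc.getD (pvMinKey vc) 0 == 1 && pvMinKey vc == 1)
  else if count.size == 1 then true
  else vc.size == 1 && vc.contains 1

-- the 'for i in range(len(nums)-1, -1, -1)' loop; fuel i+1 means Python index i.
-- Fuel 0 = loop exhausted: Python A falls off and returns None there (only reachable for
-- nums = [], excluded by Pre_); the port returns 0 there.
def pvLoopA (nums : List Int) : Nat → PySem.Dict Int Int → PySem.Dict Int Int → Int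
  | 0, _, _ => 0
  | i+1, count, vc =>
    if pvCheckA count vc then ((i : Int) + 1)
    else
      let cur := PySem.List.pyGetD nums (i : Int) 0   -- nums[i]; i is always in range here
      let c := count.getD cur 0
      let vc1 := vc.insert c (vc.getD c 0 - 1)
      let vc2 := if c - 1 ≠ 0 then vc1.insert (c - 1) (vc1.getD (c - 1) 0 + 1) else vc1
      let count1 := count.insert cur (c - 1)
      let count2 := if count1.getD cur 0 == 0 then count1.erase cur else count1
      let vc3 := if vc2.getD c 0 == 0 then vc2.erase c else vc2
      pvLoopA nums i count2 vc3

def maxEqualFreq (nums : List Int) : Int :=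
  let count := PySem.Dict.counter nums
  let valuesCount := PySem.Dict.counter count.values
  pvLoopA nums nums.length count valuesCount

-- ===== PORT B =====
-- _valid(count, freq) of Source B; freq[hi]/freq[lo] exist whenever looked up, so .getD is exact
def pvValidB (count freq : PySem.Dict Int Int) : Bool :=
  if freq.size == 2 then
    let hi := pvMaxKey freq
    let lo := pvMinKey freq
    if hi - 1 == lo && freq.getD hi 0 == 1 then true
    else freq.getD lo 0 == 1 && lo == 1
  else if count.size == 1 then true
  else freq.size == 1 && freq.contains 1

-- the body of Source B's 'for i, x in enumerate(nums)' loop; state = (count, freq, ans)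
def pvStepB (st : PySem.Dict Int Int × PySem.Dict Int Int × Int) (p : Int × Int) :
    PySem.Dict Int Int × PySem.Dict Int Int × Int :=
  let count := st.1
  let freq := st.2.1
  let ans := st.2.2
  let c := count.getD p.2 0
  let freq1 :=
    if c ≠ 0 then
      let f2 := freq.insert c (freq.getD c 0 - 1)
      if f2.getD c 0 == 0 then f2.erase c else f2
    else freq
  let count1 := count.insert p.2 (c + 1)
  let freq2 := freq1.insert (c + 1) (freq1.getD (c + 1) 0 + 1)
  let ans1 := if pvValidB count1 freq2 then p.1 + 1 else ans
  (count1, freq2, ans1)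

def maxEqualFreq_alt (nums : List Int) : Int :=
  ((PySem.List.enumerate nums).foldl pvStepB (PySem.Dict.empty, PySem.Dict.empty, 0)).2.2

-- ===== PRECONDITION & SPEC =====
-- Pre_ excludes only the empty list, on which Python A falls through its loop and returns
-- None (not an int); B returns 0 there.
def Pre_maxEqualFreq (nums : List Int) : Prop := nums ≠ []
instance (nums : List Int) : Decidable (Pre_maxEqualFreq nums) := by unfold Pre_maxEqualFreq; infer_instance
def pvWitness_maxEqualFreq : List Int := [2, 2, 1, 1, 2]

def Spec_maxEqualFreq (nums : List Int) (out : Int) : Prop := out = maxEqualFreq_alt nums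
instance (nums : List Int) (out : Int) : Decidable (Spec_maxEqualFreq nums out) := by unfold Spec_maxEqualFreq; infer_instance

-- ===== CLAIM (what is proved, stated in full; the proofs are below) =====
def Claim_equal_maxEqualFreq : Prop := ∀ (nums : List Int), Dom_maxEqualFreq nums → Pre_maxEqualFreq nums → Spec_maxEqualFreq nums (maxEqualFreq nums)

-- ===== LEMMAS AND PROOFS =====

-- abstraction: d represents the finitely-supported function f (keys distinct, lookups = f,
-- key present iff value nonzero)
def pvRep (d : PySem.Dict Int Int) (f : Int → Int) : Prop :=
  d.keys.Nodup ∧ (∀ k, d.getD k 0 = f k) ∧ (∀ k, k ∈ d.keys ↔ f k ≠ 0)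

-- canonical count / freq-of-counts functions of a prefix p
def pvCnt (p : List Int) (x : Int) : Int := (p.count x : Int)
def pvFrq (p : List Int) (k : Int) : Int :=
  ((PySem.Set.ofList p).countP (fun x => (p.count x : Int) == k) : Int)

def pvValidAbs (p : List Int) : Bool :=
  pvValidB (PySem.Dict.counter p) (PySem.Dict.counter (PySem.Dict.counter p).values)

-- the common abstract recursion both loops compute: largest valid prefix length ≤ i (0 if none)
def pvF (nums : List Int) : Nat → Int
  | 0 => 0
  | i+1 => if pvValidAbs (nums.take (i+1)) then (i : Int) + 1 else pvF nums i

-- ---- erase toolkit (PySem.Dict.erase has no library lemmas) ----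
lemma pvKeys_erase (d : PySem.Dict Int Int) (k : Int) :
    (d.erase k).keys = d.keys.filter (fun x => !(x == k)) := by
  simp only [PySem.Dict.erase, PySem.Dict.keys, List.filter_map]; rfl

lemma pvNodup_keys_erase (d : PySem.Dict Int Int) (k : Int) (h : d.keys.Nodup) :
    (d.erase k).keys.Nodup := by
  rw [pvKeys_erase]; exact h.filter _

lemma pvMem_keys_erase (d : PySem.Dict Int Int) (k k' : Int) :
    k' ∈ (d.erase k).keys ↔ k' ≠ k ∧ k' ∈ d.keys := by
  rw [pvKeys_erase]; simp [List.mem_filter]; tauto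

lemma pvGet?_erase (d : PySem.Dict Int Int) (k k' : Int) :
    (d.erase k).get? k' = if k' = k then none else d.get? k' := by
  rcases d with ⟨l⟩
  induction l with
  | nil => simp [PySem.Dict.erase, PySem.Dict.get?]
  | cons a t ih =>
    by_cases hak : a.1 = k <;> by_cases hak' : a.1 = k' <;>
      simp_all [PySem.Dict.erase, PySem.Dict.get?]

lemma pvGetD_erase (d : PySem.Dict Int Int) (k k' : Int) :
    (d.erase k).getD k' 0 = if k' = k then 0 else d.getD k' 0 := by
  simp [PySem.Dict.getD, pvGet?_erase]; split_ifs <;> simp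

-- ---- pvRep toolkit ----
lemma pvRep_ext {d : PySem.Dict Int Int} {f g : Int → Int} (h : pvRep d f)
    (hfg : ∀ k, f k = g k) : pvRep d g := by
  refine ⟨h.1, fun k => (h.2.1 k).trans (hfg k), fun k => ?_⟩
  rw [h.2.2 k, hfg k]

lemma pvRep_counter (xs : List Int) : pvRep (PySem.Dict.counter xs) (fun k => (xs.count k : Int)) := by
  refine ⟨PySem.Dict.nodup_keys_counter xs, fun k => PySem.Dict.getD_counter xs k, fun k => ?_⟩
  rw [PySem.Dict.keys_counter]
  rw [PySem.Set.mem_ofList, ← List.count_pos_iff]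
  simp only [ne_eq, Nat.cast_eq_zero]
  omega

lemma pvRep_counter_values (p : List Int) :
    pvRep (PySem.Dict.counter (PySem.Dict.counter p).values) (pvFrq p) := by
  refine pvRep_ext (pvRep_counter _) (fun k => ?_)
  unfold pvFrq
  have hv : (PySem.Dict.counter p).values = (PySem.Set.ofList p).map (fun x => (p.count x : Int)) := by
    simp [PySem.Dict.values, PySem.Dict.items_counter]
  rw [hv]
  norm_cast
  rw [List.count_eq_countP, List.countP_map]
  rfl

-- plain d[k] = w with w ≠ 0
lemma pvRep_insert {d : PySem.Dict Int Int} {f : Int → Int} (h : pvRep d f) (k w : Int)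
    (hw : w ≠ 0) : pvRep (d.insert k w) (fun j => if j = k then w else f j) := by
  refine ⟨PySem.Dict.nodup_keys_insert d k w h.1, fun j => ?_, fun j => ?_⟩
  · rw [PySem.Dict.getD_insert]; by_cases hj : j = k
    · simp [hj]
    · simp [hj, h.2.1 j]
  · rw [PySem.Dict.mem_keys_insert]; by_cases hj : j = k
    · simp [hj, hw]
    · simp [hj, h.2.2 j]

-- d[k] = w, followed by 'if d[k] == 0: del d[k]'
lemma pvRep_set {d : PySem.Dict Int Int} {f : Int → Int} (h : pvRep d f) (k w : Int) :
    pvRep (let d1 := d.insert k w; if d1.getD k 0 == 0 then d1.erase k else d1)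
      (fun j => if j = k then w else f j) := by
  simp only [PySem.Dict.getD_insert_self, beq_iff_eq]
  split_ifs with hw
  · subst hw
    refine ⟨pvNodup_keys_erase _ _ (PySem.Dict.nodup_keys_insert d k 0 h.1), fun j => ?_, fun j => ?_⟩
    · rw [pvGetD_erase, PySem.Dict.getD_insert]
      by_cases hj : j = k
      · simp [hj]
      · simp [hj, h.2.1 j]
    · rw [pvMem_keys_erase, PySem.Dict.mem_keys_insert]
      by_cases hj : j = k
      · simp [hj]
      · simp [hj, h.2.2 j]
  · exact pvRep_insert h k w hw

lemma pvMax?_perm {l1 l2 : List Int} (h : l1.Perm l2) :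
    PySem.List.max? l1 (fun k => k) = PySem.List.max? l2 (fun k => k) := by
  cases h1 : PySem.List.max? l1 (fun k => k) with
  | none =>
    rw [PySem.List.max?_eq_none_iff] at h1
    subst h1
    rw [eq_comm, PySem.List.max?_eq_none_iff]
    exact h.nil_eq.symm ▸ rfl
  | some m =>
    cases h2 : PySem.List.max? l2 (fun k => k) with
    | none =>
      rw [PySem.List.max?_eq_none_iff] at h2
      subst h2
      rw [List.perm_nil.mp h] at h1
      rw [show PySem.List.max? ([] : List Int) (fun k => k) = none from
        (PySem.List.max?_eq_none_iff _ _).mpr rfl] at h1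
      exact absurd h1 (by simp)
    | some m' =>
      have hm := PySem.List.max?_mem h1
      have hm' := PySem.List.max?_mem h2
      have h3 := PySem.List.max?_isMax h1 m' (h.mem_iff.mpr hm')
      have h4 := PySem.List.max?_isMax h2 m (h.mem_iff.mp hm)
      simp only [Option.some.injEq]
      omega

lemma pvMin?_perm {l1 l2 : List Int} (h : l1.Perm l2) :
    PySem.List.min? l1 (fun k => k) = PySem.List.min? l2 (fun k => k) := by
  cases h1 : PySem.List.min? l1 (fun k => k) with
  | none =>
    rw [PySem.List.min?_eq_none_iff] at h1
    subst h1
    rw [eq_comm, PySem.List.min?_eq_none_iff]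
    exact h.nil_eq.symm ▸ rfl
  | some m =>
    cases h2 : PySem.List.min? l2 (fun k => k) with
    | none =>
      rw [PySem.List.min?_eq_none_iff] at h2
      subst h2
      rw [List.perm_nil.mp h] at h1
      rw [show PySem.List.min? ([] : List Int) (fun k => k) = none from
        (PySem.List.min?_eq_none_iff _ _).mpr rfl] at h1
      exact absurd h1 (by simp)
    | some m' =>
      have hm := PySem.List.min?_mem h1
      have hm' := PySem.List.min?_mem h2
      have h3 := PySem.List.min?_isMin h1 m' (h.mem_iff.mpr hm')
      have h4 := PySem.List.min?_isMin h2 m (h.mem_iff.mp hm)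
      simp only [Option.some.injEq]
      omega

lemma pvKeys_perm {d d' : PySem.Dict Int Int} {f : Int → Int}
    (hd : pvRep d f) (hd' : pvRep d' f) : d.keys.Perm d'.keys :=
  (List.perm_ext_iff_of_nodup hd.1 hd'.1).mpr (fun a => (hd.2.2 a).trans (hd'.2.2 a).symm)

lemma pvSize_eq_keys_length (d : PySem.Dict Int Int) : d.size = d.keys.length := by
  simp [PySem.Dict.size, PySem.Dict.keys]


-- 'if d[c] == 0: del d[c]' restores the representation invariant at c
lemma pvRep_fix {e : PySem.Dict Int Int} {f : Int → Int} (c : Int)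
    (hnd : e.keys.Nodup) (hget : ∀ j, e.getD j 0 = f j)
    (hmem : ∀ j, j ≠ c → (j ∈ e.keys ↔ f j ≠ 0)) (hc : c ∈ e.keys) :
    pvRep (if e.getD c 0 == 0 then e.erase c else e) f := by
  have hgc : e.getD c 0 = f c := hget c
  by_cases h0 : f c = 0
  · rw [show (if e.getD c 0 == 0 then e.erase c else e) = e.erase c by simp [hgc, h0]]
    refine ⟨pvNodup_keys_erase _ _ hnd, fun j => ?_, fun j => ?_⟩
    · rw [pvGetD_erase]
      by_cases hj : j = c
      · simp [hj, h0]
      · simp [hj, hget j]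
    · rw [pvMem_keys_erase]
      by_cases hj : j = c
      · simp [hj, h0]
      · simp [hj, hmem j hj]
  · rw [show (if e.getD c 0 == 0 then e.erase c else e) = e by simp [hgc, h0]]
    refine ⟨hnd, hget, fun j => ?_⟩
    by_cases hj : j = c
    · subst hj; simp [hc, h0]
    · exact hmem j hj

-- A's whole valuesCount surgery for one removed element, at the level of pvRep
lemma pvRep_stepA {e : PySem.Dict Int Int} {g : Int → Int} (h : pvRep e g) (c : Int)
    (hnn : 0 ≤ g (c - 1)) :
    pvRep (let vc1 := e.insert c (e.getD c 0 - 1);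
           let vc2 := if c - 1 ≠ 0 then vc1.insert (c - 1) (vc1.getD (c - 1) 0 + 1) else vc1;
           if vc2.getD c 0 == 0 then vc2.erase c else vc2)
      (fun j => if j = c then g c - 1 else if j = c - 1 ∧ c - 1 ≠ 0 then g j + 1 else g j) := by
  have hcc : c - 1 ≠ c := by omega
  simp only
  by_cases hc1 : c - 1 ≠ 0
  · -- c - 1 ≠ 0 : increment at c - 1 happens
    rw [if_pos hc1]
    refine pvRep_fix c ?_ ?_ ?_ ?_
    · exact PySem.Dict.nodup_keys_insert _ _ _ (PySem.Dict.nodup_keys_insert _ _ _ h.1)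
    · intro j
      simp only [PySem.Dict.getD_insert]
      by_cases hj : j = c
      · simp [hj, Ne.symm hcc, h.2.1 c]
      · by_cases hj1 : j = c - 1
        · simp [hj1, h.2.1 (c-1), hc1]
        · simp [hj, hj1, h.2.1 j]
    · intro j hj
      rw [PySem.Dict.mem_keys_insert, PySem.Dict.mem_keys_insert]
      by_cases hj1 : j = c - 1
      · subst hj1
        have : g (c - 1) + 1 ≠ 0 := by omega
        simp [hj, hc1, this]
      · simp [hj, hj1, h.2.2 j]
    · simp [PySem.Dict.mem_keys_insert]
  · -- c - 1 = 0 : no increment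
    rw [if_neg hc1]
    have hc1' : c - 1 = 0 := by omega
    refine pvRep_fix c ?_ ?_ ?_ ?_
    · exact PySem.Dict.nodup_keys_insert _ _ _ h.1
    · intro j
      rw [PySem.Dict.getD_insert]
      by_cases hj : j = c
      · simp [hj, h.2.1 c]
      · simp [hj, hc1', h.2.1 j]
    · intro j hj
      rw [PySem.Dict.mem_keys_insert]
      simp [hj, hc1', h.2.2 j]
    · simp [PySem.Dict.mem_keys_insert]

-- ---- validity depends only on the abstractions ----
lemma pvValid_congr {d d' e e' : PySem.Dict Int Int} {f g : Int → Int}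
    (hd : pvRep d f) (hd' : pvRep d' f) (he : pvRep e g) (he' : pvRep e' g) :
    pvValidB d e = pvValidB d' e' := by
  have hpe : e.keys.Perm e'.keys := pvKeys_perm he he'
  have hpd : d.keys.Perm d'.keys := pvKeys_perm hd hd'
  have hse : e.size = e'.size := by rw [pvSize_eq_keys_length, pvSize_eq_keys_length, hpe.length_eq]
  have hsd : d.size = d'.size := by rw [pvSize_eq_keys_length, pvSize_eq_keys_length, hpd.length_eq]
  have hmax : pvMaxKey e = pvMaxKey e' := by rw [pvMaxKey, pvMaxKey, pvMax?_perm hpe]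
  have hmin : pvMinKey e = pvMinKey e' := by rw [pvMinKey, pvMinKey, pvMin?_perm hpe]
  have hget : ∀ k, e.getD k 0 = e'.getD k 0 := fun k => (he.2.1 k).trans (he'.2.1 k).symm
  have hcon : e.contains 1 = e'.contains 1 := by
    rw [Bool.eq_iff_iff, PySem.Dict.contains_iff_mem_keys, PySem.Dict.contains_iff_mem_keys,
      he.2.2, he'.2.2]
  simp only [pvValidB, hse, hsd, hmax, hmin, hget, hcon]

lemma pvCheckA_eq_validB (count vc : PySem.Dict Int Int) :
    pvCheckA count vc = pvValidB count vc := by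
  simp only [pvCheckA, pvValidB]
  by_cases h1 : (vc.size == 2) = true
  · simp only [h1, if_true]
    cases h2 : (pvMaxKey vc - 1 == pvMinKey vc && vc.getD (pvMaxKey vc) 0 == 1) <;> simp
  · simp only [Bool.not_eq_true] at h1
    simp only [h1, Bool.false_eq_true, if_false]

-- ---- appending one element to the prefix, at the level of pvCnt / pvFrq ----
lemma pvCnt_append (p : List Int) (x y : Int) :
    pvCnt (p ++ [x]) y = if y = x then pvCnt p x + 1 else pvCnt p y := by
  unfold pvCnt
  by_cases h : y = x
  · simp [h, List.count_append]
  · simp [h, List.count_append,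
      List.count_eq_zero.mpr (fun hm => h (List.mem_singleton.mp hm))]

lemma pvOfList_append (p : List Int) (x : Int) :
    PySem.Set.ofList (p ++ [x]) = PySem.Set.add (PySem.Set.ofList p) x := by
  rw [PySem.Set.ofList_eq_foldl, PySem.Set.ofList_eq_foldl, List.foldl_append]
  rfl

lemma pvFrq_append (p : List Int) (x k : Int) :
    pvFrq (p ++ [x]) k =
      pvFrq p k - (if k = pvCnt p x ∧ pvCnt p x ≠ 0 then 1 else 0)
        + (if k = pvCnt p x + 1 then 1 else 0) := by
  unfold pvFrq pvCnt
  rw [pvOfList_append]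
  have hnd : (PySem.Set.ofList p).Nodup := PySem.Set.nodup_ofList p
  have hmem : ∀ y, y ∈ PySem.Set.ofList p ↔ y ∈ p := fun y => PySem.Set.mem_ofList p y
  have hcnt : ∀ y, y ≠ x → (p ++ [x]).count y = p.count y := by
    intro y hy
    simp [List.count_append, List.count_eq_zero.mpr (fun hm => hy (List.mem_singleton.mp hm))]
  have hcx : (p ++ [x]).count x = p.count x + 1 := by simp [List.count_append]
  by_cases hx : x ∈ p
  · have hxS : x ∈ PySem.Set.ofList p := (hmem x).mpr hx
    have hadd : PySem.Set.add (PySem.Set.ofList p) x = PySem.Set.ofList p := by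
      simp [PySem.Set.add, PySem.Set.contains, hxS]
    rw [hadd]
    have hperm : (PySem.Set.ofList p).Perm (x :: (PySem.Set.ofList p).erase x) :=
      List.perm_cons_erase hxS
    have hT : ∀ y ∈ (PySem.Set.ofList p).erase x, y ≠ x := by
      intro y hy
      exact (List.Nodup.mem_erase_iff hnd).mp hy |>.1
    rw [hperm.countP_eq, hperm.countP_eq]
    simp only [List.countP_cons]
    have hTeq : ((PySem.Set.ofList p).erase x).countP (fun y => ((p ++ [x]).count y : Int) == k)
        = ((PySem.Set.ofList p).erase x).countP (fun y => (p.count y : Int) == k) := by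
      apply List.countP_congr
      intro y hy
      rw [hcnt y (hT y hy)]
    rw [hTeq, hcx]
    have hc0 : (p.count x : Int) ≠ 0 := by
      have := List.count_pos_iff.mpr hx
      omega
    push_cast
    by_cases h1 : k = (p.count x : Int) <;> by_cases h2 : k = (p.count x : Int) + 1 <;>
      simp [h1, h2] <;> omega
  · have hxS : x ∉ PySem.Set.ofList p := fun h => hx ((hmem x).mp h)
    have hadd : PySem.Set.add (PySem.Set.ofList p) x = PySem.Set.ofList p ++ [x] := by
      simp [PySem.Set.add, PySem.Set.contains, hxS]
    rw [hadd, List.countP_append]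
    have hTeq : (PySem.Set.ofList p).countP (fun y => ((p ++ [x]).count y : Int) == k)
        = (PySem.Set.ofList p).countP (fun y => (p.count y : Int) == k) := by
      apply List.countP_congr
      intro y hy
      rw [hcnt y (fun e => hxS (e ▸ hy))]
    have hc0 : (p.count x : Int) = 0 := by
      simp [List.count_eq_zero.mpr hx]
    rw [hTeq]
    simp only [List.countP_cons, List.countP_nil, hcx, hc0]
    push_cast
    by_cases h2 : k = (p.count x : Int) + 1
    · subst h2
      simp [hc0]
    · simp [hc0]
      omega

lemma pvFrq_nonneg (p : List Int) (k : Int) : 0 ≤ pvFrq p k := by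
  unfold pvFrq; positivity

-- ---- the two loops both compute pvF ----
-- the canonical dicts of a prefix represent pvCnt / pvFrq, and the check agrees
lemma pvCheckA_abs {count vc : PySem.Dict Int Int} {p : List Int}
    (hc : pvRep count (pvCnt p)) (hv : pvRep vc (pvFrq p)) :
    pvCheckA count vc = pvValidAbs p := by
  rw [pvCheckA_eq_validB]
  exact pvValid_congr hc (pvRep_counter p) hv (pvRep_counter_values p)

lemma pvValidB_abs {count vc : PySem.Dict Int Int} {p : List Int}
    (hc : pvRep count (pvCnt p)) (hv : pvRep vc (pvFrq p)) :
    pvValidB count vc = pvValidAbs p :=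
  pvValid_congr hc (pvRep_counter p) hv (pvRep_counter_values p)

lemma pvFrq_step (p : List Int) (x j : Int) :
    (if j = pvCnt p x + 1 then pvFrq (p ++ [x]) (pvCnt p x + 1) - 1
     else if j = pvCnt p x + 1 - 1 ∧ pvCnt p x + 1 - 1 ≠ 0 then pvFrq (p ++ [x]) j + 1
     else pvFrq (p ++ [x]) j) = pvFrq p j := by
  have hfa := pvFrq_append p x j
  have hfa' := pvFrq_append p x (pvCnt p x + 1)
  have h0 : 0 ≤ pvCnt p x := Int.natCast_nonneg _
  by_cases h1 : j = pvCnt p x + 1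
  · subst h1
    rw [if_pos rfl, hfa']
    have hne : ¬(pvCnt p x + 1 = pvCnt p x ∧ pvCnt p x ≠ 0) := by omega
    rw [if_neg hne, if_pos rfl]
    omega
  · rw [if_neg h1, hfa]
    by_cases h2 : j = pvCnt p x + 1 - 1 ∧ pvCnt p x + 1 - 1 ≠ 0
    · rw [if_pos h2]
      have h2' : j = pvCnt p x ∧ pvCnt p x ≠ 0 := by omega
      rw [if_pos h2', if_neg h1]
      omega
    · rw [if_neg h2]
      have h2' : ¬(j = pvCnt p x ∧ pvCnt p x ≠ 0) := by omega
      rw [if_neg h2', if_neg h1]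
      omega

lemma pvLoopA_eq (nums : List Int) :
    ∀ (i : Nat) (count vc : PySem.Dict Int Int), i ≤ nums.length →
      pvRep count (pvCnt (nums.take i)) → pvRep vc (pvFrq (nums.take i)) →
      pvLoopA nums i count vc = pvF nums i := by
  intro i
  induction i with
  | zero => intro count vc _ _ _; rfl
  | succ i ih =>
    intro count vc hle hc hv
    have hi : i < nums.length := hle
    have hq : nums.take (i + 1) = nums.take i ++ [nums[i]] := by
      rw [List.take_add_one, List.getElem?_eq_getElem hi]
      rfl
    rw [pvLoopA, pvF, pvCheckA_abs hc hv]
    cases hval : pvValidAbs (nums.take (i + 1)) with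
    | true => simp
    | false =>
      simp only [Bool.false_eq_true, if_false]
      -- the removal step
      have hcur : PySem.List.pyGetD nums (i : Int) 0 = nums[i] := by
        rw [PySem.List.pyGetD_natCast, List.getD_eq_getElem nums 0 hi]
      set x := nums[i] with hx
      set p := nums.take i with hp
      have hcpx : 0 ≤ pvCnt p x := Int.natCast_nonneg _
      have hcval : count.getD x 0 = pvCnt p x + 1 := by
        rw [hc.2.1 x, hq, pvCnt_append]
        simp
      -- freq side
      have hv' := pvRep_stepA hv (count.getD x 0) (by rw [hcval]; simpa using pvFrq_nonneg _ _)
      have hv'' : pvRep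
          (let vc1 := vc.insert (count.getD x 0) (vc.getD (count.getD x 0) 0 - 1);
           let vc2 := if count.getD x 0 - 1 ≠ 0 then
               vc1.insert (count.getD x 0 - 1) (vc1.getD (count.getD x 0 - 1) 0 + 1) else vc1;
           if vc2.getD (count.getD x 0) 0 == 0 then vc2.erase (count.getD x 0) else vc2)
          (pvFrq p) := by
        refine pvRep_ext hv' (fun j => ?_)
        simp only [hcval, hq]
        exact pvFrq_step p x j
      -- count side
      have hc' := pvRep_set hc x (count.getD x 0 - 1)
      have hc'' : pvRep
          (let d1 := count.insert x (count.getD x 0 - 1);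
           if d1.getD x 0 == 0 then d1.erase x else d1) (pvCnt p) := by
        refine pvRep_ext hc' (fun j => ?_)
        by_cases hj : j = x
        · subst hj
          rw [if_pos rfl, hcval]
          ring
        · rw [if_neg hj, hq, pvCnt_append, if_neg hj]
      rw [hcur]
      exact ih _ _ (le_of_lt hi) hc'' hv''

-- forward counterpart of pvFrq_step (c stands for pvCnt p x)
lemma pvFrq_step_fwd (p : List Int) (x k : Int) :
    (if k = pvCnt p x + 1 then pvFrq p (pvCnt p x + 1) + 1
     else if k = pvCnt p x ∧ pvCnt p x ≠ 0 then pvFrq p k - 1 else pvFrq p k)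
      = pvFrq (p ++ [x]) k := by
  have hfa := pvFrq_append p x k
  by_cases h1 : k = pvCnt p x + 1
  · subst h1
    rw [if_pos rfl, hfa]
    have hne : ¬(pvCnt p x + 1 = pvCnt p x ∧ pvCnt p x ≠ 0) := by omega
    rw [if_neg hne, if_pos rfl]
    omega
  · rw [if_neg h1, hfa, if_neg h1]
    by_cases h2 : k = pvCnt p x ∧ pvCnt p x ≠ 0
    · rw [if_pos h2, if_pos h2]
      omega
    · rw [if_neg h2, if_neg h2]
      omega

-- one step of Source B's loop, at the level of the abstraction
lemma pvStepB_spec {count freq : PySem.Dict Int Int} {p : List Int} (ans i y : Int)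
    (hc : pvRep count (pvCnt p)) (hv : pvRep freq (pvFrq p)) :
    pvRep (pvStepB (count, freq, ans) (i, y)).1 (pvCnt (p ++ [y])) ∧
    pvRep (pvStepB (count, freq, ans) (i, y)).2.1 (pvFrq (p ++ [y])) ∧
    (pvStepB (count, freq, ans) (i, y)).2.2
      = if pvValidAbs (p ++ [y]) then i + 1 else ans := by
  have hcy : count.getD y 0 = pvCnt p y := hc.2.1 y
  have hc0 : 0 ≤ pvCnt p y := Int.natCast_nonneg _
  have hcnt : pvRep (count.insert y (count.getD y 0 + 1)) (pvCnt (p ++ [y])) := by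
    refine pvRep_ext (pvRep_insert hc y (count.getD y 0 + 1) (by omega)) (fun k => ?_)
    rw [pvCnt_append]
    by_cases hk : k = y
    · rw [if_pos hk, if_pos hk, hcy]
    · rw [if_neg hk, if_neg hk]
  have hmid : pvRep
      (if count.getD y 0 ≠ 0 then
        (let f2 := freq.insert (count.getD y 0) (freq.getD (count.getD y 0) 0 - 1);
         if f2.getD (count.getD y 0) 0 == 0 then f2.erase (count.getD y 0) else f2)
       else freq)
      (fun k => if k = pvCnt p y ∧ pvCnt p y ≠ 0 then pvFrq p k - 1 else pvFrq p k) := by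
    by_cases hz : count.getD y 0 ≠ 0
    · rw [if_pos hz]
      refine pvRep_ext (pvRep_set hv (count.getD y 0) (freq.getD (count.getD y 0) 0 - 1))
        (fun k => ?_)
      rw [hcy] at hz ⊢
      by_cases hk : k = pvCnt p y
      · rw [if_pos hk, if_pos ⟨hk, hz⟩, hk, hv.2.1 (pvCnt p y)]
      · rw [if_neg hk, if_neg (fun h => hk h.1)]
    · rw [if_neg hz]
      rw [hcy] at hz
      refine pvRep_ext hv (fun k => ?_)
      rw [if_neg (fun h => hz h.2)]
  have hmid1 : (if count.getD y 0 ≠ 0 then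
        (let f2 := freq.insert (count.getD y 0) (freq.getD (count.getD y 0) 0 - 1);
         if f2.getD (count.getD y 0) 0 == 0 then f2.erase (count.getD y 0) else f2)
       else freq).getD (count.getD y 0 + 1) 0 = pvFrq p (pvCnt p y + 1) := by
    rw [hmid.2.1, hcy]
    exact if_neg (by omega)
  have hfrq : pvRep
      ((if count.getD y 0 ≠ 0 then
        (let f2 := freq.insert (count.getD y 0) (freq.getD (count.getD y 0) 0 - 1);
         if f2.getD (count.getD y 0) 0 == 0 then f2.erase (count.getD y 0) else f2)
       else freq).insert (count.getD y 0 + 1)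
        ((if count.getD y 0 ≠ 0 then
        (let f2 := freq.insert (count.getD y 0) (freq.getD (count.getD y 0) 0 - 1);
         if f2.getD (count.getD y 0) 0 == 0 then f2.erase (count.getD y 0) else f2)
       else freq).getD (count.getD y 0 + 1) 0 + 1))
      (pvFrq (p ++ [y])) := by
    have hpos : pvFrq p (pvCnt p y + 1) + 1 ≠ 0 := by
      have := pvFrq_nonneg p (pvCnt p y + 1)
      omega
    rw [hmid1]
    rw [hcy] at hmid ⊢
    refine pvRep_ext (pvRep_insert hmid (pvCnt p y + 1) (pvFrq p (pvCnt p y + 1) + 1) hpos)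
      (fun k => ?_)
    exact pvFrq_step_fwd p y k
  refine ⟨hcnt, hfrq, ?_⟩
  rw [show ((pvStepB (count, freq, ans) (i, y)).2.2)
      = if pvValidB (pvStepB (count, freq, ans) (i, y)).1 (pvStepB (count, freq, ans) (i, y)).2.1
        then i + 1 else ans from rfl]
  rw [show (pvStepB (count, freq, ans) (i, y)).1 = count.insert y (count.getD y 0 + 1) from rfl]
  rw [show (pvStepB (count, freq, ans) (i, y)).2.1 = (if count.getD y 0 ≠ 0 then
        (let f2 := freq.insert (count.getD y 0) (freq.getD (count.getD y 0) 0 - 1);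
         if f2.getD (count.getD y 0) 0 == 0 then f2.erase (count.getD y 0) else f2)
       else freq).insert (count.getD y 0 + 1)
        ((if count.getD y 0 ≠ 0 then
        (let f2 := freq.insert (count.getD y 0) (freq.getD (count.getD y 0) 0 - 1);
         if f2.getD (count.getD y 0) 0 == 0 then f2.erase (count.getD y 0) else f2)
       else freq).getD (count.getD y 0 + 1) 0 + 1) from rfl]
  rw [pvValidB_abs hcnt hfrq]

lemma pvFoldB_eq (nums : List Int) :
    ∀ (suf : List Int) (j : Nat) (count freq : PySem.Dict Int Int) (ans : Int),
      nums.drop j = suf → j ≤ nums.length →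
      pvRep count (pvCnt (nums.take j)) → pvRep freq (pvFrq (nums.take j)) →
      ans = pvF nums j →
      ((PySem.List.enumerate suf (j : Int)).foldl pvStepB (count, freq, ans)).2.2
        = pvF nums nums.length := by
  intro suf
  induction suf with
  | nil =>
    intro j count freq ans hdrop hle _ _ hans
    have hj : j = nums.length := le_antisymm hle (List.drop_eq_nil_iff.mp hdrop)
    simp [PySem.List.enumerate, hans, hj]
  | cons y rest ih =>
    intro j count freq ans hdrop hle hc hv hans
    have hj : j < nums.length := by
      by_contra hn
      rw [List.drop_eq_nil_iff.mpr (by omega)] at hdrop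
      exact absurd hdrop (by simp)
    have hdc := List.drop_eq_getElem_cons hj
    rw [hdrop] at hdc
    have hy : y = nums[j] := (List.cons.inj hdc).1
    have hrest : nums.drop (j + 1) = rest := ((List.cons.inj hdc).2).symm
    have hq : nums.take (j + 1) = nums.take j ++ [y] := by
      rw [List.take_add_one, List.getElem?_eq_getElem hj, hy]
      rfl
    set p := nums.take j with hp
    have hcy : count.getD y 0 = pvCnt p y := hc.2.1 y
    have hc0 : 0 ≤ pvCnt p y := Int.natCast_nonneg _
    -- one step of the fold
    rw [show PySem.List.enumerate (y :: rest) (j : Int)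
        = ((j : Int), y) :: PySem.List.enumerate rest ((j : Int) + 1) from rfl]
    rw [List.foldl_cons]
    obtain ⟨hc1, hv1, hans1⟩ := pvStepB_spec ans (j : Int) y hc hv
    rw [← hq] at hc1 hv1
    have hans1' : (pvStepB (count, freq, ans) ((j : Int), y)).2.2 = pvF nums (j + 1) := by
      rw [hans1, ← hq, pvF, hans]
    have hcast : ((j : Int) + 1) = (((j + 1 : Nat)) : Int) := by push_cast; ring
    rw [hcast]
    have := ih (j + 1) (pvStepB (count, freq, ans) ((j : Int), y)).1
      (pvStepB (count, freq, ans) ((j : Int), y)).2.1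
      (pvStepB (count, freq, ans) ((j : Int), y)).2.2
      hrest (by omega) hc1 hv1 hans1'
    exact this

-- ===== VERDICT (by name: the statement is the Claim_ definition above) =====
theorem maxEqualFreq_spec : Claim_equal_maxEqualFreq := by
  intro nums _ _
  unfold Spec_maxEqualFreq maxEqualFreq maxEqualFreq_alt
  simp only
  have htake : nums.take nums.length = nums := List.take_length
  have hA : pvLoopA nums nums.length (PySem.Dict.counter nums)
      (PySem.Dict.counter (PySem.Dict.counter nums).values) = pvF nums nums.length := by
    refine pvLoopA_eq nums nums.length _ _ le_rfl ?_ ?_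
    · rw [htake]
      exact pvRep_ext (pvRep_counter nums) (fun k => rfl)
    · rw [htake]
      exact pvRep_counter_values nums
  have hemp_c : pvRep PySem.Dict.empty (pvCnt []) := by
    refine ⟨by simp [PySem.Dict.keys_empty], fun k => ?_, fun k => ?_⟩
    · simp [PySem.Dict.getD_empty, pvCnt]
    · simp [PySem.Dict.keys_empty, pvCnt]
  have hemp_f : pvRep PySem.Dict.empty (pvFrq []) := by
    refine ⟨by simp [PySem.Dict.keys_empty], fun k => ?_, fun k => ?_⟩
    · simp [PySem.Dict.getD_empty, pvFrq, PySem.Set.ofList]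
    · simp [PySem.Dict.keys_empty, pvFrq, PySem.Set.ofList]
  have hB : ((PySem.List.enumerate nums ((0 : Nat) : Int)).foldl pvStepB
      (PySem.Dict.empty, PySem.Dict.empty, 0)).2.2 = pvF nums nums.length := by
    refine pvFoldB_eq nums nums 0 PySem.Dict.empty PySem.Dict.empty 0 List.drop_zero
      (Nat.zero_le _) ?_ ?_ rfl
    · rw [List.take_zero]
      exact hemp_c
    · rw [List.take_zero]
      exact hemp_f
  rw [hA, ← hB]
  norm_num
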